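-- pv_equiv track=rewrite | github.com/VonPoo/BioMatch | scripts/extractSNPsfromVCF.py | _encodeKmer_strict
-- ===== SOURCE A (Python) =====
-- def _encodeKmer_strict(kmer):
--     """Strict encoding that returns None for k-mers containing non-ATCG.
--
--     Returns the canonical integer encoding of the k-mer (min of forward
--     and reverse encodings), or None if invalid bases are present.
--     """
--     fw_encode = {'A': 0, 'T': 1, 'C': 2, 'G': 3}
--     rv_encode = {'A': 1, 'T': 0, 'C': 3, 'G': 2}
--     fw = 0
--     rv = 0
--
--     # Check for N or any non-ATCG bases
--     for base in kmer:
--         if base not in fw_encode: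
--             return None
--
--     for base in kmer:
--         fw = (fw << 2) | fw_encode[base]
--
--     for base in reversed(kmer):
--         rv = (rv << 2) | rv_encode[base]
--
--     return fw if fw < rv else rv
-- ===== SOURCE B (Python) =====
-- def _encodeKmer_strict(kmer):
--     """Single forward pass: validate, build fw, and build rv by positional
--     shifts (no reversed traversal); canonical value is min(fw, rv)."""
--     codes = {'A': 0, 'T': 1, 'C': 2, 'G': 3}
--     comp = {'A': 1, 'T': 0, 'C': 3, 'G': 2}
--     fw = 0
--     rv = 0
--     shift = 0
--     for base in kmer:
--         c = codes.get(base)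
--         if c is None:
--             return None
--         fw = (fw << 2) | c
--         rv |= comp[base] << shift
--         shift += 2
--     return min(fw, rv)
-- ===== Notes on version B (the rewrite author's own statement) =====
-- stated objective: alternative
-- what changed: Replaced A's three traversals (validity scan, forward-encoding loop, reversed-string loop) by one forward pass that validates, builds fw, and builds the reverse-strand encoding rv via increasing positional shifts, returning min(fw, rv).
import Mathlib
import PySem

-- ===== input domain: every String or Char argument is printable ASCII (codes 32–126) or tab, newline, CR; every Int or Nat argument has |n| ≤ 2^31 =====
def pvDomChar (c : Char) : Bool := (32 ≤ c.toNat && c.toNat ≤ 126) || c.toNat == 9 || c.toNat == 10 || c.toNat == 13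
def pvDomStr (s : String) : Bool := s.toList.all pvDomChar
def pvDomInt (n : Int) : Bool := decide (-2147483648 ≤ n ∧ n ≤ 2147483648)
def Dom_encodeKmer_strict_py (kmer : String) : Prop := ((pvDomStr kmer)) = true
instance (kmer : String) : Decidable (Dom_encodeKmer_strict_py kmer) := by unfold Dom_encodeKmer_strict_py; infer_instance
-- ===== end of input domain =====

-- B replaces A's three loops (validity scan, fw loop, loop over reversed(kmer)) with ONE
-- forward pass that validates, builds fw, and builds rv by positional shifts; same values.


-- ===== PORT A =====
-- fw_encode / rv_encode dicts of A
def pvFwEncode : PySem.Dict Char Int := PySem.Dict.ofList [('A', 0), ('T', 1), ('C', 2), ('G', 3)]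
def pvRvEncode : PySem.Dict Char Int := PySem.Dict.ofList [('A', 1), ('T', 0), ('C', 3), ('G', 2)]

-- A: first loop returns None on the first invalid base (≡ all-check); then two encoding
-- loops.  '(x << 2) | code' on x ≥ 0 with 0 ≤ code < 4 is exactly x*4 + code (disjoint
-- fresh low bits), so the ports write it that way; dict subscript is getD after the check.
def encodeKmer_strict_py (kmer : String) : Option Int :=
  if kmer.toList.all (fun base => pvFwEncode.contains base) then
    let fw : Int := kmer.toList.foldl (fun a base => a * 4 + pvFwEncode.getD base 0) 0
    let rv : Int := kmer.toList.reverse.foldl (fun a base => a * 4 + pvRvEncode.getD base 0) 0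
    some (if fw < rv then fw else rv)
  else none

-- ===== PORT B =====
def pvCodesAlt : PySem.Dict Char Int := PySem.Dict.ofList [('A', 0), ('T', 1), ('C', 2), ('G', 3)]
def pvCompAlt : PySem.Dict Char Int := PySem.Dict.ofList [('A', 1), ('T', 0), ('C', 3), ('G', 2)]

-- B's single loop: state (fw, rv, shift); 'rv |= comp[base] << shift' sets fresh bits,
-- exactly rv + comp[base] * 2^shift.
def pvGoAlt : List Char → Int → Int → Nat → Option Int
  | [], fw, rv, _ => some (min fw rv)
  | base :: rest, fw, rv, shift =>
    match pvCodesAlt.get? base with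
    | none => none
    | some c => pvGoAlt rest (fw * 4 + c) (rv + pvCompAlt.getD base 0 * 2 ^ shift) (shift + 2)

def encodeKmer_strict_py_alt (kmer : String) : Option Int :=
  pvGoAlt kmer.toList 0 0 0

-- ===== PRECONDITION & SPEC =====
def Spec_encodeKmer_strict_py (kmer : String) (out : Option Int) : Prop := out = encodeKmer_strict_py_alt kmer
instance (kmer : String) (out : Option Int) : Decidable (Spec_encodeKmer_strict_py kmer out) := by unfold Spec_encodeKmer_strict_py; infer_instance

-- ===== CLAIM (what is proved, stated in full; the proofs are below) =====
def Claim_equal_encodeKmer_strict_py : Prop := ∀ (kmer : String), Dom_encodeKmer_strict_py kmer → Spec_encodeKmer_strict_py kmer (encodeKmer_strict_py kmer)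

-- ===== LEMMAS AND PROOFS =====

-- R cs = Σ_i rv_code(cs[i]) * 4^i : the reverse-strand value with char i at weight 4^i
def pvR : List Char → Int
  | [] => 0
  | c :: t => pvRvEncode.getD c 0 + 4 * pvR t

theorem pv_dicts_fw : pvCodesAlt = pvFwEncode := rfl
theorem pv_dicts_rv : pvCompAlt = pvRvEncode := rfl

-- A's fold over the reversed list computes pvR
theorem pv_revfold (cs : List Char) :
    cs.reverse.foldl (fun a base => a * 4 + pvRvEncode.getD base 0) 0 = pvR cs := by
  induction cs with
  | nil => rfl
  | cons c t ih =>
      simp [pvR, List.foldl_append, ih]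
      ring

-- characterization of B's loop
theorem pv_go_spec (cs : List Char) (fw rv : Int) (sh : Nat) :
    pvGoAlt cs fw rv sh =
      if cs.all (fun base => pvFwEncode.contains base) then
        some (min (cs.foldl (fun a base => a * 4 + pvFwEncode.getD base 0) fw)
                  (rv + pvR cs * 2 ^ sh))
      else none := by
  induction cs generalizing fw rv sh with
  | nil => simp [pvGoAlt, pvR]
  | cons c t ih =>
      rcases h : pvCodesAlt.get? c with _ | v
      · have hc : pvFwEncode.contains c = false := by
          rw [← pv_dicts_fw, PySem.Dict.contains_eq_isSome_get?, h]; rfl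
        simp [pvGoAlt, h, hc]
      · have hc : pvFwEncode.contains c = true := by
          rw [← pv_dicts_fw, PySem.Dict.contains_eq_isSome_get?, h]; rfl
        have hv : pvFwEncode.getD c 0 = v := by
          rw [← pv_dicts_fw, PySem.Dict.getD_eq_get?_getD, h]; rfl
        simp only [pvGoAlt, h, ih, List.all_cons, hc, Bool.true_and, List.foldl_cons]
        split_ifs with hall
        · rw [hv, pv_dicts_rv, pvR]
          congr 2
          ring
        · rfl

theorem encodeKmer_strict_py_spec' (kmer : String) :
    encodeKmer_strict_py kmer = encodeKmer_strict_py_alt kmer := by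
  unfold encodeKmer_strict_py encodeKmer_strict_py_alt
  rw [pv_go_spec]
  split_ifs with h
  · rw [pv_revfold]
    refine congrArg some ?_
    simp only [min_def, pow_zero, mul_one, zero_add]
    split_ifs <;> omega
  · rfl

-- ===== VERDICT (by name: the statement is the Claim_ definition above) =====
theorem encodeKmer_strict_py_spec : Claim_equal_encodeKmer_strict_py := by
  intro kmer _
  exact encodeKmer_strict_py_spec' kmer
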